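-- pv_equiv track=rewrite | github.com/Abdulsametklc/LeetCode | 3870-count-commas-in-range/3870-count-commas-in-range.py | countCommas
-- ===== SOURCE A (Python) =====
-- def countCommas(n):
--     total = 0
--     start = 1000
--     commas = 1
--
--     while start <= n:
--         end = min(n, start * 1000 - 1)
--         count = end - start + 1
--         total += count * commas
--
--         start *= 1000
--         commas += 1
--
--     return total
-- ===== SOURCE B (Python) =====
-- def countCommas(n):
--     # Closed form: K = number of comma thresholds 10^3,10^6,... that are <= n,
--     # answer = sum_{k=1..K} (n - 1000^k + 1) = K*(n+1) - (1000^(K+1)-1000)//999.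
--     if n < 1000:
--         return 0
--     K = (len(str(n)) - 1) // 3
--     return K * (n + 1) - (1000 ** (K + 1) - 1000) // 999
-- ===== Notes on version B (the rewrite author's own statement) =====
-- stated objective: simpler
-- what changed: Replaces A's band-by-band while loop with a direct closed form: K = (len(str(n))-1)//3 comma thresholds, answer K*(n+1) minus the geometric series (1000**(K+1)-1000)//999.
import Mathlib
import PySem

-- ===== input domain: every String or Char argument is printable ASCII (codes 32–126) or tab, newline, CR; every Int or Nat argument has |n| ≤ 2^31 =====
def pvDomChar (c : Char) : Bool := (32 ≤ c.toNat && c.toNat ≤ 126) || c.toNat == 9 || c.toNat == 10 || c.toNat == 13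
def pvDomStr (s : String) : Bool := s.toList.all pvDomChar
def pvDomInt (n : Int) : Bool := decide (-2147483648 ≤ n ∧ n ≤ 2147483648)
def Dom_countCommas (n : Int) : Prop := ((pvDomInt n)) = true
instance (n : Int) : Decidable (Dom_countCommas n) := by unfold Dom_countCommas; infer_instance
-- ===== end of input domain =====

-- B replaces A's band-by-band while loop with a closed-form formula (no loop); same value, similar cost.

-- ===== PORT A =====
-- A's while loop, state (start, commas, total); the `1 ≤ start` conjunct is a
-- totality guard only (every actual call has start ≥ 1000, where it is vacuous).
def countCommasLoop (n start commas total : Int) : Int :=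
  if h : 1 ≤ start ∧ start ≤ n then
    countCommasLoop n (start * 1000) (commas + 1)
      (total + (min n (start * 1000 - 1) - start + 1) * commas)
  else total
termination_by (n + 1 - start).toNat
decreasing_by
  have h1 : start + 1 ≤ start * 1000 := by nlinarith [h.1]
  omega

def countCommas (n : Int) : Int := countCommasLoop n 1000 1 0

-- ===== PORT B =====
-- closed form: K comma thresholds, K*(n+1) - geometric series; K ≥ 1 in the
-- else-branch, so the Nat exponent `(K + 1).toNat` is exact for Python's `1000 ** (K + 1)`.
def countCommas_alt (n : Int) : Int :=
  if n < 1000 then 0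
  else
    let K := PySem.Int.floordiv (PySem.Str.len (PySem.Int.toStr n) - 1) 3
    K * (n + 1) - PySem.Int.floordiv ((1000 : Int) ^ (K + 1).toNat - 1000) 999

-- ===== PRECONDITION & SPEC =====
def Spec_countCommas (n : Int) (out : Int) : Prop := out = countCommas_alt n
instance (n : Int) (out : Int) : Decidable (Spec_countCommas n out) := by unfold Spec_countCommas; infer_instance

-- ===== CLAIM (what is proved, stated in full; the proofs are below) =====
def Claim_equal_countCommas : Prop := ∀ (n : Int), Dom_countCommas n → Spec_countCommas n (countCommas n)

-- ===== LEMMAS AND PROOFS =====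

theorem loop_stop (n start commas total : Int) (h : ¬ (1 ≤ start ∧ start ≤ n)) :
    countCommasLoop n start commas total = total := by
  rw [countCommasLoop, dif_neg h]

theorem loop_step (n start commas total : Int) (h : 1 ≤ start ∧ start ≤ n) :
    countCommasLoop n start commas total =
      countCommasLoop n (start * 1000) (commas + 1)
        (total + (min n (start * 1000 - 1) - start + 1) * commas) := by
  conv_lhs => rw [countCommasLoop]
  rw [dif_pos h]

/-- decimal length of `str(n)` bracketed by powers of 10 -/
theorem len_toStr_bounds (n : Int) (a b : Nat) (ha : 0 < a) (hb : 0 < b)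
    (h1 : (10 : Int) ^ a ≤ n) (h2 : n < (10 : Int) ^ b) :
    (a : Int) < PySem.Str.len (PySem.Int.toStr n) ∧
      PySem.Str.len (PySem.Int.toStr n) ≤ (b : Int) := by
  have hn0 : 0 ≤ n := le_trans (by positivity) h1
  have hnn : ¬ n < 0 := by omega
  have hchars : (PySem.Int.toStr n).toList = Nat.toDigits 10 n.toNat := by
    rw [PySem.Int.toList_toStr, PySem.Int.toChars, if_neg hnn]
  have hlo : (10 : Nat) ^ a ≤ n.toNat := by
    have : ((10 ^ a : Nat) : Int) ≤ n := by push_cast; exact h1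
    omega
  have hhi : n.toNat < (10 : Nat) ^ b := by
    have : n < ((10 ^ b : Nat) : Int) := by push_cast; exact h2
    omega
  have hub : (Nat.toDigits 10 n.toNat).length ≤ b :=
    (Nat.length_toDigits_le_iff (by norm_num) hb).mpr hhi
  have hlb : ¬ (Nat.toDigits 10 n.toNat).length ≤ a := by
    rw [Nat.length_toDigits_le_iff (by norm_num) ha]
    omega
  rw [PySem.Str.len_eq, hchars]
  omega

theorem countCommas_spec : Claim_equal_countCommas := by
  intro n hd
  unfold Spec_countCommas
  have hdom : -2147483648 ≤ n ∧ n ≤ 2147483648 := by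
    simpa [Dom_countCommas, pvDomInt] using hd
  by_cases hn : n < 1000
  · rw [countCommas, loop_stop n 1000 1 0 (by omega), countCommas_alt, if_pos hn]
  · push_neg at hn
    rw [countCommas_alt, if_neg (by omega)]
    by_cases h6 : n < 1000000
    · -- one comma band: 1000 ≤ n < 10^6
      have hlen := len_toStr_bounds n 3 6 (by norm_num) (by norm_num)
        (by norm_num; omega) (by norm_num; omega)
      have hK : PySem.Int.floordiv (PySem.Str.len (PySem.Int.toStr n) - 1) 3 = 1 := by
        rw [PySem.Int.floordiv_eq_iff_of_pos (by norm_num)]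
        omega
      simp only [hK]
      have hfd : PySem.Int.floordiv ((1000 : Int) ^ ((1 : Int) + 1).toNat - 1000) 999 = 1000 := by
        decide
      rw [hfd, countCommas, loop_step n 1000 1 0 ⟨by norm_num, by omega⟩,
        loop_stop _ _ _ _ (by omega)]
      have hmin : min n (1000 * 1000 - 1) = n := min_eq_left (by omega)
      rw [hmin]; ring
    · push_neg at h6
      by_cases h9 : n < 1000000000
      · -- two comma bands: 10^6 ≤ n < 10^9
        have hlen := len_toStr_bounds n 6 9 (by norm_num) (by norm_num)
          (by norm_num; omega) (by norm_num; omega)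
        have hK : PySem.Int.floordiv (PySem.Str.len (PySem.Int.toStr n) - 1) 3 = 2 := by
          rw [PySem.Int.floordiv_eq_iff_of_pos (by norm_num)]
          omega
        simp only [hK]
        have hfd : PySem.Int.floordiv ((1000 : Int) ^ ((2 : Int) + 1).toNat - 1000) 999 = 1001000 := by
          decide
        rw [hfd, countCommas, loop_step n 1000 1 0 ⟨by norm_num, by omega⟩,
          loop_step _ _ _ _ ⟨by norm_num, by omega⟩, loop_stop _ _ _ _ (by omega)]
        have hmin1 : min n (1000 * 1000 - 1) = 1000 * 1000 - 1 := min_eq_right (by omega)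
        have hmin2 : min n (1000 * 1000 * 1000 - 1) = n := min_eq_left (by omega)
        rw [hmin1, hmin2]; ring
      · push_neg at h9
        -- three comma bands: 10^9 ≤ n ≤ 2^31
        have hlen := len_toStr_bounds n 9 12 (by norm_num) (by norm_num)
          (by norm_num; omega) (by norm_num; omega)
        have hK : PySem.Int.floordiv (PySem.Str.len (PySem.Int.toStr n) - 1) 3 = 3 := by
          rw [PySem.Int.floordiv_eq_iff_of_pos (by norm_num)]
          omega
        simp only [hK]
        have hfd : PySem.Int.floordiv ((1000 : Int) ^ ((3 : Int) + 1).toNat - 1000) 999 = 1001001000 := by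
          decide
        rw [hfd, countCommas, loop_step n 1000 1 0 ⟨by norm_num, by omega⟩,
          loop_step _ _ _ _ ⟨by norm_num, by omega⟩,
          loop_step _ _ _ _ ⟨by norm_num, by omega⟩, loop_stop _ _ _ _ (by omega)]
        have hmin1 : min n (1000 * 1000 - 1) = 1000 * 1000 - 1 := min_eq_right (by omega)
        have hmin2 : min n (1000 * 1000 * 1000 - 1) = 1000 * 1000 * 1000 - 1 :=
          min_eq_right (by omega)
        have hmin3 : min n (1000 * 1000 * 1000 * 1000 - 1) = n := min_eq_left (by omega)
        rw [hmin1, hmin2, hmin3]; ring
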